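-- pv_equiv track=rewrite | github.com/rotes328/AOC2023 | day12/day12.py | check
-- ===== SOURCE A (Python) =====
-- def check(numbers, combinations):
--     possible = 0
--     for combination in combinations:
--         if len([c for c in combination.split('.') if c != '']) != len(numbers):
--             continue
--         else:
--             if tuple(map(len, [chars for chars in combination.split('.') if chars != ''])) == numbers:
--                 possible += 1
--     return possible
-- ===== SOURCE B (Python) =====
-- def check(numbers, combinations):
--     possible = 0
--     for combination in combinations:
--         lengths = []
--         run = 0
--         for ch in combination:
--             if ch == '.':
--                 if run > 0:
--                     lengths.append(run)
--                 run = 0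
--             else:
--                 run += 1
--         if run > 0:
--             lengths.append(run)
--         if tuple(lengths) == numbers:
--             possible += 1
--     return possible
-- ===== Notes on version B (the rewrite author's own statement) =====
-- stated objective: alternative
-- what changed: B replaces A's two split('.')-and-filter passes per string (plus the separate length pre-check) with a single manual run-length scan that accumulates group lengths with a running counter, then one comparison against the numbers.
import Mathlib
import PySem

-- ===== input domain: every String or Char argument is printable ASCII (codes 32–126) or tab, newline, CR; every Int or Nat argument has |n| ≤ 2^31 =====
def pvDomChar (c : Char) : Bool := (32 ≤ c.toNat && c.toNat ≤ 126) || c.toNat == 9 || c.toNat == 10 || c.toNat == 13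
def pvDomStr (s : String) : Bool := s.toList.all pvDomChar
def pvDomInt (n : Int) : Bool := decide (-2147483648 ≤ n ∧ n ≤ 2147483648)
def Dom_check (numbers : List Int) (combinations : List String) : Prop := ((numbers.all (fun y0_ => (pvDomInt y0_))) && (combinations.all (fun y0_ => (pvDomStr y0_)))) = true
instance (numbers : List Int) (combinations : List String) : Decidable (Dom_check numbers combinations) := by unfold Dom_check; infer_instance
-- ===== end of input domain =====

-- B does one manual run-length scan per string (running counter, flush at '.' and at the end)
-- instead of A's two split('.')+filter passes and separate length pre-check; same cost, different
-- decomposition.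


-- ===== PORT A =====
def check (numbers : List Int) (combinations : List String) : Int :=
  combinations.foldl (fun possible combination =>
    -- len([c for c in combination.split('.') if c != '']) != len(numbers) → continue
    if (((PySem.Chars.splitOn combination.toList ['.']).filter (fun c => c != [])).length : Int)
        ≠ (numbers.length : Int) then possible
    else
      -- tuple(map(len, [chars for chars in combination.split('.') if chars != ''])) == numbers
      if (((PySem.Chars.splitOn combination.toList ['.']).filter (fun chars => chars != [])).map
            (fun chars => (chars.length : Int))) == numbers
      then possible + 1 else possible) 0

-- ===== PORT B =====
def check_alt (numbers : List Int) (combinations : List String) : Int :=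
  combinations.foldl (fun possible combination =>
    let st := combination.toList.foldl
      (fun (st : List Int × Int) ch =>
        if ch == '.' then ((if st.2 > 0 then st.1 ++ [st.2] else st.1), 0)
        else (st.1, st.2 + 1)) ([], 0)
    let lengths := if st.2 > 0 then st.1 ++ [st.2] else st.1
    if lengths == numbers then possible + 1 else possible) 0

-- ===== PRECONDITION & SPEC =====
def Spec_check (numbers : List Int) (combinations : List String) (out : Int) : Prop := out = check_alt numbers combinations
instance (numbers : List Int) (combinations : List String) (out : Int) : Decidable (Spec_check numbers combinations out) := by unfold Spec_check; infer_instance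

-- ===== CLAIM (what is proved, stated in full; the proofs are below) =====
def Claim_equal_check : Prop := ∀ (numbers : List Int) (combinations : List String), Dom_check numbers combinations → Spec_check numbers combinations (check numbers combinations)

-- ===== LEMMAS AND PROOFS =====

-- Abstract run-length description both sides are reduced to.
def pvRuns (cs : List Char) (run : Int) : List Int :=
  match cs with
  | [] => if run > 0 then [run] else []
  | c :: rest => if c = '.' then (if run > 0 then run :: pvRuns rest 0 else pvRuns rest 0)
                 else pvRuns rest (run + 1)

-- Reference shape of splitting on '.' with an accumulator of the current (reversed) piece.
def pvSplitDot (cs : List Char) (cur : List Char) : List (List Char) :=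
  match cs with
  | [] => [cur.reverse]
  | c :: rest => if c = '.' then cur.reverse :: pvSplitDot rest [] else pvSplitDot rest (c :: cur)

theorem splitOn_go_eq (l : List Char) (fuel : Nat) (cur : List Char) (acc : List (List Char))
    (h : l.length ≤ fuel) :
    PySem.Chars.splitOn.go ['.'] fuel l cur acc = acc.reverse ++ pvSplitDot l cur := by
  induction l generalizing fuel cur acc with
  | nil => cases fuel <;> simp [PySem.Chars.splitOn.go, pvSplitDot]
  | cons c rest ih =>
    cases fuel with
    | zero => simp at h
    | succ f =>
      simp only [PySem.Chars.splitOn.go, pvSplitDot, List.isPrefixOf]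
      by_cases hc : c = '.'
      · subst hc
        simpa using ih f [] (List.reverse cur :: acc) (by simpa using Nat.lt_succ_iff.mp (by simpa using h))
      · have hb : ('.' == c) = false := beq_eq_false_iff_ne.mpr (Ne.symm hc)
        rw [ih f (c :: cur) acc (by simpa using Nat.lt_succ_iff.mp (by simpa using h))] at *
        simp [hb, hc]

theorem splitOn_eq (cs : List Char) :
    PySem.Chars.splitOn cs ['.'] = pvSplitDot cs [] := by
  unfold PySem.Chars.splitOn
  rw [splitOn_go_eq cs (cs.length + 1) [] [] (by omega)]
  rfl

-- Filtering the empty pieces and taking lengths yields the run lengths.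
theorem splitDot_lens (cs : List Char) (cur : List Char) :
    ((pvSplitDot cs cur).filter (fun g => g != [])).map (fun g => (g.length : Int))
      = pvRuns cs (cur.length : Int) := by
  induction cs generalizing cur with
  | nil =>
    by_cases h : cur = []
    · simp [pvSplitDot, pvRuns, h]
    · have hl : (0 : Int) < (cur.length : Int) := by
        have : 0 < cur.length := List.length_pos_iff.mpr h
        exact_mod_cast this
      simp [pvSplitDot, pvRuns, h, hl]
  | cons c rest ih =>
    by_cases hc : c = '.'
    · subst hc
      by_cases h : cur = []
      · simp [pvSplitDot, pvRuns, h, ih]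
      · have hl : (0 : Int) < cur.length := by
          have : 0 < cur.length := List.length_pos_iff.mpr h
          exact_mod_cast this
        simp [pvSplitDot, pvRuns, h, hl, ih]
    · have h2 := ih (c :: cur)
      simp only [List.length_cons] at h2
      push_cast at h2
      simpa [pvSplitDot, pvRuns, hc] using h2

-- A's group lengths for one string.
theorem groups_eq_runs (cs : List Char) :
    ((PySem.Chars.splitOn cs ['.']).filter (fun g => g != [])).map (fun g => (g.length : Int))
      = pvRuns cs 0 := by
  rw [splitOn_eq]
  simpa using splitDot_lens cs []

-- B's inner scan computes exactly pvRuns.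
theorem scan_eq_runs (cs : List Char) (pre : List Int) (run : Int) :
    (let st := cs.foldl
      (fun (st : List Int × Int) ch =>
        if ch == '.' then ((if st.2 > 0 then st.1 ++ [st.2] else st.1), 0)
        else (st.1, st.2 + 1)) (pre, run)
     if st.2 > 0 then st.1 ++ [st.2] else st.1) = pre ++ pvRuns cs run := by
  induction cs generalizing pre run with
  | nil => simp only [List.foldl, pvRuns]; split_ifs <;> simp
  | cons c rest ih =>
    by_cases h : c = '.'
    · subst h
      by_cases hr : run > 0
      · simpa [pvRuns, hr, List.append_assoc] using ih (pre ++ [run]) 0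
      · simpa [pvRuns, hr] using ih pre 0
    · simpa [pvRuns, h] using ih pre (run + 1)

-- Both folds count the strings whose run lengths equal numbers.
theorem check_eq_countP (numbers : List Int) (combinations : List String) :
    check numbers combinations =
      (combinations.countP (fun c => pvRuns c.toList 0 == numbers) : Int) := by
  unfold check
  have hg : (fun (possible : Int) (combination : String) =>
      if (((PySem.Chars.splitOn combination.toList ['.']).filter (fun c => c != [])).length : Int)
          ≠ (numbers.length : Int) then possible
      else
        if (((PySem.Chars.splitOn combination.toList ['.']).filter (fun chars => chars != [])).map
              (fun chars => (chars.length : Int))) == numbers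
        then possible + 1 else possible)
      = fun acc c => if (fun c => pvRuns c.toList 0 == numbers) c then acc + 1 else acc := by
    funext acc c
    have hG := groups_eq_runs c.toList
    by_cases hlen : (((PySem.Chars.splitOn c.toList ['.']).filter (fun g => g != [])).length : Int)
        = (numbers.length : Int)
    · simp only [hlen, ne_eq, not_true_eq_false, if_false, hG]
    · have hne : pvRuns c.toList 0 ≠ numbers := by
        intro h
        apply hlen
        rw [← hG] at h
        have := congrArg List.length h
        simpa using congrArg (Int.ofNat) this
      simp [hlen, hne]
  rw [hg, PySem.List.foldl_if_add_one]
  simp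

theorem check_alt_eq_countP (numbers : List Int) (combinations : List String) :
    check_alt numbers combinations =
      (combinations.countP (fun c => pvRuns c.toList 0 == numbers) : Int) := by
  unfold check_alt
  have hg : (fun (possible : Int) (combination : String) =>
      let st := combination.toList.foldl
        (fun (st : List Int × Int) ch =>
          if ch == '.' then ((if st.2 > 0 then st.1 ++ [st.2] else st.1), 0)
          else (st.1, st.2 + 1)) ([], 0)
      let lengths := if st.2 > 0 then st.1 ++ [st.2] else st.1
      if lengths == numbers then possible + 1 else possible)
      = fun acc c => if (fun c => pvRuns c.toList 0 == numbers) c then acc + 1 else acc := by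
    funext acc c
    have hs := scan_eq_runs c.toList [] 0
    simp only [List.nil_append] at hs
    simp only [hs]
  rw [hg, PySem.List.foldl_if_add_one]
  simp

-- ===== VERDICT (by name: the statement is the Claim_ definition above) =====
theorem check_spec : Claim_equal_check := by
  intro numbers combinations _
  unfold Spec_check
  rw [check_eq_countP, check_alt_eq_countP]
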